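-- pv_equiv track=rewrite | github.com/hzq1995/Pokemon_selecting | pokemon.py | next_indices
-- ===== SOURCE A (Python) =====
-- TYPE_NUM = 18  # 共存在18种属性的宝可梦
--
-- PARTY_NUM = 6  # 一个队伍中共包含6个宝可梦
--
-- def next_indices(now, index_deal=PARTY_NUM-1):
--     if now[index_deal] + 1 > TYPE_NUM - PARTY_NUM + index_deal:
--         if index_deal == 0:
--             return None
--         else:
--             return next_indices(now, index_deal-1)
--     else:
--         now[index_deal] += 1
--         for i in range(index_deal+1, PARTY_NUM):
--             now[i] = now[index_deal] + i - index_deal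
--         return now
-- ===== SOURCE B (Python) =====
-- TYPE_NUM = 18  # 18 pokemon types
--
-- PARTY_NUM = 6  # 6 pokemon per party
--
-- def next_indices(now, index_deal=PARTY_NUM-1):
--     # Descending scan instead of tail recursion: find the rightmost position
--     # (at or left of index_deal) that can still be incremented, then rewrite
--     # the tail of the combination as one consecutive run via slice assignment.
--     for j in range(index_deal, -1, -1):
--         if now[j] < TYPE_NUM - PARTY_NUM + j:
--             base = now[j] + 1
--             now[j:PARTY_NUM] = [base + k for k in range(PARTY_NUM - j)]
--             return now
--     return None
-- ===== Notes on version B (the rewrite author's own statement) =====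
-- stated objective: idiomatic
-- what changed: Replaced A's tail recursion over index_deal and its element-by-element fill loop with a single explicit descending scan for the first incrementable slot followed by one slice assignment that rewrites slots j..5 as a consecutive run.
-- intended difference: On negative index_deal A's value comes from Python's negative-index wraparound (it increments a wrapped slot and rewrites the party relative to a negative position, e.g. ([0,0,0,0,0,0], -1) -> [2,3,4,5,6,7]), while B returns None (no next combination); for advancing a combination index vector a start position before the party is exhausted, so B's value is the intended one. — e.g. on next_indices([0, 0, 0, 0, 0, 0], -1): A returns some [2, 3, 4, 5, 6, 7], B returns none
import Mathlib
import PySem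

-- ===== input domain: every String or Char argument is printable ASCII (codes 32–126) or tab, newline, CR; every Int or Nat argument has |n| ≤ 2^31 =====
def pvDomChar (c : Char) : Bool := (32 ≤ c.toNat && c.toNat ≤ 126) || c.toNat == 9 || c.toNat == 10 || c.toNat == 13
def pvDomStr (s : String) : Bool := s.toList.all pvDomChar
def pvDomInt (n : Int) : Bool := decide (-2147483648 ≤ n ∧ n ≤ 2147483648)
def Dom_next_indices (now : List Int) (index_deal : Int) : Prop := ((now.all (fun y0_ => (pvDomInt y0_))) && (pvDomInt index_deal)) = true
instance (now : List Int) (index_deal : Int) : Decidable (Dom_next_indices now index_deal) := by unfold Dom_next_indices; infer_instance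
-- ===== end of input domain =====

-- B replaces A's tail recursion by a single descending scan for the first
-- incrementable position followed by one slice assignment (idiomatic rewrite).
-- Both A and B mutate `now` in place on their success paths; the equivalence
-- proved here is about the return value.

-- ===== PORT A =====
-- Python assignment xs[i] = v: PySem.List.pySetD is exact wherever Python's
-- assignment returns (Raise.InRange; a raising write is outside Pre_).
-- A's recursion: the index can go negative (Python then wraps reads/writes);
-- it stops at index_deal = 0 or when now[index_deal] raises IndexError.
def nextIndicesGoA (now : List Int) (index_deal : Int) : Option (List Int) :=
  match h : PySem.List.pyGet? now index_deal with
  | none => none   -- Python raises IndexError here; excluded by Pre_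
  | some v =>
    if v + 1 > 18 - 6 + index_deal then
      if index_deal = 0 then none
      else nextIndicesGoA now (index_deal - 1)
    else
      -- now[index_deal] += 1, then for i in range(index_deal+1, 6):
      --   now[i] = now[index_deal] + i - index_deal  (a FRESH read each time)
      some ((PySem.List.pyRange (index_deal + 1) 6 1).foldl
        (fun acc i => PySem.List.pySetD acc i
          (PySem.List.pyGetD acc index_deal 0 + i - index_deal))
        (PySem.List.pySetD now index_deal (v + 1)))
termination_by (index_deal + now.length + 1).toNat
decreasing_by
  have hne : ¬ (PySem.List.pyGet? now index_deal = none) := by simp [h]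
  rw [PySem.List.pyGet?_eq_none_iff] at hne
  rw [not_not] at hne
  unfold PySem.Raise.InRange at hne
  omega

def next_indices (now : List Int) (index_deal : Int) : Option (List Int) :=
  nextIndicesGoA now index_deal

-- ===== PORT B =====
def next_indices_alt (now : List Int) (index_deal : Int) : Option (List Int) :=
  match (PySem.List.pyRange index_deal (-1) (-1)).find?
      (fun j => decide (PySem.List.pyGetD now j 0 < 18 - 6 + j)) with
  | none => none
  | some j =>
    let base := PySem.List.pyGetD now j 0 + 1
    some (now.take j.toNat ++
          (List.range (6 - j.toNat)).map (fun k => base + (k : Int)) ++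
          now.drop 6)

-- ===== PRECONDITION & SPEC =====
-- Pre_ admits exactly the inputs on which Python A returns normally, except for
-- start positions past the party (5 < index_deal), which are excluded: there
-- A's value (incrementing a slot beyond the party) is an accident of the
-- unreachable fill loop.  So: a start position 0..5 over a party of ≥ 6 slots;
-- a shorter list only in the exhausted case (no slot k ≤ index_deal can be
-- advanced — A returns None; otherwise its fill loop writes past the end and
-- raises IndexError); and a negative start position exactly when some wrapped
-- slot in range can still be advanced (otherwise A runs past the front and
-- raises IndexError).
def Pre_next_indices (now : List Int) (index_deal : Int) : Prop :=
  (0 ≤ index_deal ∧ index_deal ≤ 5 ∧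
    (6 ≤ now.length ∨
      (index_deal < now.length ∧
        ∀ k < now.length, (k : Int) ≤ index_deal → 12 + (k : Int) ≤ now.getD k 0))) ∨
  (index_deal < 0 ∧ 6 ≤ now.length ∧
    ∃ k < (index_deal + now.length + 1).toNat,
      now.getD ((now.length : Int) + index_deal - (k : Int)).toNat 0 + 1
        ≤ 12 + (index_deal - (k : Int)))
instance (now : List Int) (index_deal : Int) : Decidable (Pre_next_indices now index_deal) := by
  unfold Pre_next_indices; infer_instance

def pvWitness_next_indices : List Int × Int := ([0, 1, 2, 3, 4, 5], 5)

-- On negative index_deal A's value comes from Python's negative-index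
-- wraparound (it increments a wrapped slot and rewrites the party relative to
-- a negative position, e.g. [0,0,0,0,0,0], -1 ↦ [2,3,4,5,6,7]), while B
-- returns None ("no next combination"); for advancing a combination index
-- vector a position before the start is exhausted, so B's value is the
-- intended one.
def D_next_indices (now : List Int) (index_deal : Int) : Prop := index_deal < 0
instance (now : List Int) (index_deal : Int) : Decidable (D_next_indices now index_deal) := by
  unfold D_next_indices; infer_instance

def Spec_next_indices (now : List Int) (index_deal : Int) (out : Option (List Int)) : Prop := ¬ D_next_indices now index_deal → out = next_indices_alt now index_deal
instance (now : List Int) (index_deal : Int) (out : Option (List Int)) : Decidable (Spec_next_indices now index_deal out) := by unfold Spec_next_indices; infer_instance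

def pvDiffWitness_next_indices : List Int × Int := ([0, 0, 0, 0, 0, 0], -1)
def pvDiffWitnessOut_next_indices : (Option (List Int)) × (Option (List Int)) :=
  (some [2, 3, 4, 5, 6, 7], none)

-- ===== CLAIM (what is proved, stated in full; the proofs are below) =====
def Claim_unchanged_next_indices : Prop := ∀ (now : List Int) (index_deal : Int), Dom_next_indices now index_deal → Pre_next_indices now index_deal → Spec_next_indices now index_deal (next_indices now index_deal)
def Claim_changed_next_indices : Prop := Dom_next_indices (pvDiffWitness_next_indices.1) (pvDiffWitness_next_indices.2) ∧ Pre_next_indices (pvDiffWitness_next_indices.1) (pvDiffWitness_next_indices.2) ∧ D_next_indices (pvDiffWitness_next_indices.1) (pvDiffWitness_next_indices.2) ∧ next_indices (pvDiffWitness_next_indices.1) (pvDiffWitness_next_indices.2) = pvDiffWitnessOut_next_indices.1 ∧ next_indices_alt (pvDiffWitness_next_indices.1) (pvDiffWitness_next_indices.2) = pvDiffWitnessOut_next_indices.2 ∧ pvDiffWitnessOut_next_indices.1 ≠ pvDiffWitnessOut_next_indices.2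
def Claim_exact_next_indices : Prop := ∀ (now : List Int) (index_deal : Int), Dom_next_indices now index_deal → Pre_next_indices now index_deal → D_next_indices now index_deal → next_indices now index_deal ≠ next_indices_alt now index_deal

-- ===== LEMMAS AND PROOFS =====

lemma exists_six (now : List Int) (h : 6 ≤ now.length) :
    ∃ a b c d e f rest, now = a :: b :: c :: d :: e :: f :: rest := by
  rcases now with _ | ⟨a, _ | ⟨b, _ | ⟨c, _ | ⟨d, _ | ⟨e, _ | ⟨f, rest⟩⟩⟩⟩⟩⟩ <;>
    simp at h
  exact ⟨a, b, c, d, e, f, rest, rfl⟩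

-- A's fill loop (increment slot n, rewrite slots n+1..5) equals B's slice image.
lemma fill_eq (now : List Int) (hlen : 6 ≤ now.length) (n : Nat) (hn : n ≤ 5) (v : Int) :
    (PySem.List.pyRange ((n : Int) + 1) 6 1).foldl
      (fun acc i => PySem.List.pySetD acc i
        (PySem.List.pyGetD acc ((n : Int)) 0 + i - (n : Int)))
      (PySem.List.pySetD now ((n : Int)) (v + 1))
    = now.take n ++ (List.range (6 - n)).map (fun k => v + 1 + (k : Int)) ++ now.drop 6 := by
  obtain ⟨a, b, c, d, e, f, rest, rfl⟩ := exists_six now hlen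
  have r0 : PySem.List.pyRange 1 6 1 = [1, 2, 3, 4, 5] := by decide
  have r1 : PySem.List.pyRange 2 6 1 = [2, 3, 4, 5] := by decide
  have r2 : PySem.List.pyRange 3 6 1 = [3, 4, 5] := by decide
  have r3 : PySem.List.pyRange 4 6 1 = [4, 5] := by decide
  have r4 : PySem.List.pyRange 5 6 1 = [5] := by decide
  have r5 : PySem.List.pyRange 6 6 1 = [] := by decide
  interval_cases n
  all_goals norm_num [r0, r1, r2, r3, r4, r5, List.range_succ, List.foldl,
    PySem.List.pySetD_of_nonneg, PySem.List.pyGetD_ofNat', List.set,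
    show (1:Int).toNat = 1 from rfl, show (2:Int).toNat = 2 from rfl,
    show (3:Int).toNat = 3 from rfl, show (4:Int).toNat = 4 from rfl,
    show (5:Int).toNat = 5 from rfl]
  all_goals try simp only [List.set, List.cons.injEq, true_and, and_true]
  all_goals try omega

-- A's recursion from position n (0 ≤ n ≤ 5, party of ≥ 6 slots) equals B's
-- descending scan from position n.
lemma go_eq (now : List Int) (hlen : 6 ≤ now.length) (n : Nat) (hn : n ≤ 5) :
    nextIndicesGoA now (n : Int) = next_indices_alt now (n : Int) := by
  induction n with
  | zero =>
    rw [nextIndicesGoA, next_indices_alt]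
    have hml : 0 < now.length := by omega
    have hg : PySem.List.pyGet? now ((0 : Nat) : Int) = some now[0] := by
      rw [PySem.List.pyGet?_natCast]
      exact List.getElem?_eq_getElem hml
    have hd : PySem.List.pyGetD now ((0 : Nat) : Int) 0 = now[0] := by
      rw [PySem.List.pyGetD_natCast, List.getD_eq_getElem _ _ hml]
    rw [PySem.List.pyRange_neg_one_cons (by omega : (-1 : Int) < ((0 : Nat) : Int))]
    rw [PySem.List.pyRange_neg_one_eq_nil (by omega : ((0 : Nat) : Int) - 1 ≤ -1)]
    split
    · next heq => rw [hg] at heq; simp at heq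
    · next v heq =>
      rw [hg] at heq
      injection heq with hv
      subst hv
      by_cases hc : now[0] + 1 > 18 - 6 + ((0 : Nat) : Int)
      · rw [if_pos hc, if_pos (by norm_num : ((0 : Nat) : Int) = 0),
          List.find?_cons_of_neg (by simp only [decide_eq_true_eq, not_lt]; rw [hd]; omega)]
        rfl
      · rw [if_neg hc,
          List.find?_cons_of_pos (by simp only [decide_eq_true_eq]; rw [hd]; omega)]
        simp only [Int.toNat_natCast, hd]
        rw [fill_eq now hlen 0 (by omega) now[0]]
  | succ m ih =>
    rw [nextIndicesGoA, next_indices_alt]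
    have hml : m + 1 < now.length := by omega
    have hg : PySem.List.pyGet? now ((m + 1 : Nat) : Int) = some now[m + 1] := by
      rw [PySem.List.pyGet?_natCast]
      exact List.getElem?_eq_getElem hml
    have hd : PySem.List.pyGetD now ((m + 1 : Nat) : Int) 0 = now[m + 1] := by
      rw [PySem.List.pyGetD_natCast, List.getD_eq_getElem _ _ hml]
    rw [PySem.List.pyRange_neg_one_cons (by omega : (-1 : Int) < ((m + 1 : Nat) : Int))]
    split
    · next heq => rw [hg] at heq; simp at heq
    · next v heq =>
      rw [hg] at heq
      injection heq with hv
      subst hv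
      by_cases hc : now[m + 1] + 1 > 18 - 6 + ((m + 1 : Nat) : Int)
      · rw [if_pos hc, if_neg (by omega : ¬ (((m + 1 : Nat) : Int) = 0)),
          List.find?_cons_of_neg (by simp only [decide_eq_true_eq, not_lt]; rw [hd]; omega)]
        rw [show ((m + 1 : Nat) : Int) - 1 = ((m : Nat) : Int) by push_cast; ring]
        rw [ih (by omega), next_indices_alt]
      · rw [if_neg hc,
          List.find?_cons_of_pos (by simp only [decide_eq_true_eq]; rw [hd]; omega)]
        simp only [Int.toNat_natCast, hd]
        rw [fill_eq now hlen (m + 1) (by omega) now[m + 1]]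

-- In the exhausted case both the recursion and the scan return none.
lemma go_fail (now : List Int) (n : Nat) (hlt : n < now.length)
    (hfail : ∀ k : Nat, k ≤ n → 12 + (k : Int) ≤ now.getD k 0) :
    nextIndicesGoA now (n : Int) = none ∧ next_indices_alt now (n : Int) = none := by
  induction n with
  | zero =>
    rw [nextIndicesGoA, next_indices_alt]
    have hg : PySem.List.pyGet? now ((0 : Nat) : Int) = some now[0] := by
      rw [PySem.List.pyGet?_natCast]
      exact List.getElem?_eq_getElem hlt
    have hd : PySem.List.pyGetD now ((0 : Nat) : Int) 0 = now.getD 0 0 :=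
      PySem.List.pyGetD_natCast now 0 0
    have h0 := hfail 0 (le_refl 0)
    have hgd : now.getD 0 0 = now[0] := List.getD_eq_getElem _ _ hlt
    rw [PySem.List.pyRange_neg_one_cons (by omega : (-1 : Int) < ((0 : Nat) : Int))]
    rw [PySem.List.pyRange_neg_one_eq_nil (by omega : ((0 : Nat) : Int) - 1 ≤ -1)]
    constructor
    · split
      · next heq => rfl
      · next v heq =>
        rw [hg] at heq
        injection heq with hv
        subst hv
        rw [if_pos (by omega : now[0] + 1 > 18 - 6 + ((0 : Nat) : Int)),
          if_pos (by norm_num : ((0 : Nat) : Int) = 0)]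
    · rw [List.find?_cons_of_neg (by simp only [decide_eq_true_eq, not_lt]; rw [hd]; omega)]
      rfl
  | succ m ih =>
    rw [nextIndicesGoA, next_indices_alt]
    have hg : PySem.List.pyGet? now ((m + 1 : Nat) : Int) = some now[m + 1] := by
      rw [PySem.List.pyGet?_natCast]
      exact List.getElem?_eq_getElem hlt
    have hd : PySem.List.pyGetD now ((m + 1 : Nat) : Int) 0 = now.getD (m + 1) 0 :=
      PySem.List.pyGetD_natCast now (m + 1) 0
    have hm := hfail (m + 1) (le_refl _)
    have hgd : now.getD (m + 1) 0 = now[m + 1] := List.getD_eq_getElem _ _ hlt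
    have ih' := ih (by omega) (fun k hk => hfail k (by omega))
    rw [PySem.List.pyRange_neg_one_cons (by omega : (-1 : Int) < ((m + 1 : Nat) : Int))]
    constructor
    · split
      · next heq => rfl
      · next v heq =>
        rw [hg] at heq
        injection heq with hv
        subst hv
        rw [if_pos (by omega : now[m + 1] + 1 > 18 - 6 + ((m + 1 : Nat) : Int)),
          if_neg (by omega : ¬ (((m + 1 : Nat) : Int) = 0))]
        rw [show ((m + 1 : Nat) : Int) - 1 = ((m : Nat) : Int) by push_cast; ring]
        exact ih'.1
    · rw [List.find?_cons_of_neg (by simp only [decide_eq_true_eq, not_lt]; rw [hd]; omega)]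
      rw [show ((m + 1 : Nat) : Int) - 1 = ((m : Nat) : Int) by push_cast; ring]
      have h2 := ih'.2
      rw [next_indices_alt] at h2
      exact h2

-- On a negative start with an advanceable wrapped slot in range, A's
-- recursion returns a value (used for the tightness theorem).
lemma go_neg_some (now : List Int) (n : Nat) :
    ∀ idx : Int, idx < 0 → -(now.length : Int) ≤ idx → (idx + now.length).toNat = n →
      (∃ j : Int, -(now.length : Int) ≤ j ∧ j ≤ idx ∧
        now.getD ((now.length : Int) + j).toNat 0 + 1 ≤ 12 + j) →
      ∃ ys, nextIndicesGoA now idx = some ys := by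
  induction n using Nat.strong_induction_on with
  | _ n ih =>
    intro idx hneg hge hn hex
    have hk1 : 0 < (-idx).toNat := by omega
    have hk2 : (-idx).toNat ≤ now.length := by omega
    have hidx : idx = -(((-idx).toNat : Nat) : Int) := by omega
    have hlt : now.length - (-idx).toNat < now.length := by omega
    have hg : PySem.List.pyGet? now idx = some now[now.length - (-idx).toNat] := by
      conv_lhs => rw [hidx]
      rw [PySem.List.pyGet?_neg_natCast now ((-idx).toNat) hk1 hk2]
      exact List.getElem?_eq_getElem hlt
    rw [nextIndicesGoA]
    split
    · next heq => rw [hg] at heq; simp at heq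
    · next v heq =>
      rw [hg] at heq
      injection heq with hv
      subst hv
      by_cases hc : now[now.length - (-idx).toNat] + 1 > 18 - 6 + idx
      · rw [if_pos hc, if_neg (by omega : ¬ idx = 0)]
        obtain ⟨j, hj1, hj2, hj3⟩ := hex
        have hjne : j ≠ idx := by
          intro hEq
          subst hEq
          have hpos : ((now.length : Int) + j).toNat = now.length - (-j).toNat := by omega
          rw [hpos, List.getD_eq_getElem _ _ (by omega)] at hj3
          omega
        exact ih (idx - 1 + now.length).toNat (by omega) (idx - 1) (by omega)
          (by omega) rfl ⟨j, hj1, by omega, hj3⟩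
      · rw [if_neg hc]
        exact ⟨_, rfl⟩

-- B's scan is empty for a negative start.
lemma alt_neg_none (now : List Int) (idx : Int) (h : idx < 0) :
    next_indices_alt now idx = none := by
  rw [next_indices_alt, PySem.List.pyRange_neg_one_eq_nil (by omega : idx ≤ -1)]
  rfl

-- ===== VERDICT (by name: the statements are the Claim_ definitions above) =====
theorem next_indices_spec : Claim_unchanged_next_indices := by
  intro now index_deal _ hpre
  unfold Spec_next_indices
  intro hnd
  have h0 : 0 ≤ index_deal := by
    by_contra hc
    exact hnd (by unfold D_next_indices; omega)
  rcases hpre with ⟨_, h5, hcase⟩ | ⟨hneg, _⟩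
  · obtain ⟨m, rfl⟩ : ∃ m : Nat, index_deal = (m : Int) :=
      ⟨index_deal.toNat, (Int.toNat_of_nonneg h0).symm⟩
    rw [next_indices]
    rcases hcase with hlen | ⟨hlt, hfail⟩
    · exact go_eq now hlen m (by omega)
    · have h := go_fail now m (by omega) (fun k hk => hfail k (by omega) (by omega))
      rw [h.1, h.2]
  · omega

theorem next_indices_changed : Claim_changed_next_indices := by
  unfold Claim_changed_next_indices
  refine ⟨by decide, by decide, by decide, ?_, by decide, by decide⟩
  rw [show pvDiffWitness_next_indices = ([0, 0, 0, 0, 0, 0], -1) from rfl]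
  rw [next_indices, nextIndicesGoA]
  decide

theorem next_indices_tight : Claim_exact_next_indices := by
  intro now index_deal _ hpre hD
  have hneg : index_deal < 0 := hD
  rcases hpre with ⟨h0, _⟩ | ⟨_, hlen, k, hk, hcond⟩
  · omega
  · obtain ⟨ys, hA⟩ := go_neg_some now (index_deal + now.length).toNat index_deal hneg
      (by omega) rfl
      ⟨index_deal - (k : Int), by omega, by omega, by
        rw [show (now.length : Int) + (index_deal - (k : Int))
            = (now.length : Int) + index_deal - (k : Int) by ring]
        exact hcond⟩
    rw [next_indices, hA, alt_neg_none now index_deal hneg]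
    simp
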